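-- pv_equiv track=rewrite | github.com/baptistep/jobscraper | web_ui.py | group_jobs_by_source
-- ===== SOURCE A (Python) =====
-- def group_jobs_by_source(jobs):
--     """Group jobs by their source/company"""
--     grouped = {}
--     for job in jobs:
--         source = job.get('source', 'Unknown')
--         if source not in grouped:
--             grouped[source] = []
--         grouped[source].append(job)
--
--     # Sort jobs within each group by scraped_at (newest first)
--     for source in grouped:
--         grouped[source].sort(key=lambda x: x.get('scraped_at', ''), reverse=True)
--
--     return grouped
-- ===== SOURCE B (Python) =====
-- def group_jobs_by_source(jobs):
--     """Group jobs by their source/company"""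
--     ordered = sorted(jobs, key=lambda x: x.get('scraped_at', ''), reverse=True)
--     grouped = {job.get('source', 'Unknown'): [] for job in jobs}
--     for job in ordered:
--         grouped[job.get('source', 'Unknown')].append(job)
--     return grouped
-- ===== Notes on version B (the rewrite author's own statement) =====
-- stated objective: alternative
-- what changed: Instead of grouping first and then sorting every bucket separately, B stable-sorts the whole jobs list once by scraped_at (descending) and then fills the buckets in a single pass, relying on sort stability to leave each bucket newest-first.
import Mathlib
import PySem

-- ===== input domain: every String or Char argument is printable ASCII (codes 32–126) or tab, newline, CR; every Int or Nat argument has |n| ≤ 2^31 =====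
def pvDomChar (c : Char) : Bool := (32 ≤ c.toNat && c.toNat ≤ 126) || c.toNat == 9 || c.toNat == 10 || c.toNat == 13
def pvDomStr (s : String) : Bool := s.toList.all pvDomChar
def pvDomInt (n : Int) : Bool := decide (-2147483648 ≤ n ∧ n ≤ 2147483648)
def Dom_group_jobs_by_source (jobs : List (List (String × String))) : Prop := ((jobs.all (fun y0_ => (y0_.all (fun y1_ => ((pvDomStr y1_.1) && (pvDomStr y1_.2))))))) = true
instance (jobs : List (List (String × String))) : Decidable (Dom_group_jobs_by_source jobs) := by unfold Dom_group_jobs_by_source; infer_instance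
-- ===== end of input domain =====

-- B replaces A's "group, then sort every bucket" by one stable descending sort of the
-- whole list followed by a single grouping pass (objective: alternative decomposition).

-- shared tiny lookups: job.get('source','Unknown') and job.get('scraped_at','')
def pvSrc (job : List (String × String)) : String :=
  PySem.Dict.getD (PySem.Dict.mk job) "source" "Unknown"
def pvDate (job : List (String × String)) : String :=
  PySem.Dict.getD (PySem.Dict.mk job) "scraped_at" ""

-- ===== PORT A =====
-- one iteration of A's first loop: if source not in grouped: grouped[source] = []; grouped[source].append(job)
def pvStepA (d : PySem.Dict String (List (List (String × String)))) (job : List (String × String)) :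
    PySem.Dict String (List (List (String × String))) :=
  let s := pvSrc job
  let d1 := if d.contains s = false then d.insert s [] else d
  d1.insert s (d1.getD s [] ++ [job])

def group_jobs_by_source (jobs : List (List (String × String))) : List (String × List (List (String × String))) :=
  let grouped := jobs.foldl pvStepA PySem.Dict.empty
  -- for source in grouped: grouped[source].sort(key=lambda x: x.get('scraped_at',''), reverse=True)
  let grouped2 := grouped.keys.foldl
    (fun d s => d.insert s (PySem.List.sorted (d.getD s []) pvDate true)) grouped
  grouped2.items

-- ===== PORT B =====
def group_jobs_by_source_alt (jobs : List (List (String × String))) : List (String × List (List (String × String))) :=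
  let ordered := PySem.List.sorted jobs pvDate true
  -- {job.get('source','Unknown'): [] for job in jobs}
  let grouped := jobs.foldl (fun d job => d.insert (pvSrc job) []) PySem.Dict.empty
  -- for job in ordered: grouped[job.get('source','Unknown')].append(job)
  let grouped2 := ordered.foldl (fun d job => d.modify (pvSrc job) [] (· ++ [job])) grouped
  grouped2.items

-- ===== PRECONDITION & SPEC =====
def Spec_group_jobs_by_source (jobs : List (List (String × String))) (out : List (String × List (List (String × String)))) : Prop := out = group_jobs_by_source_alt jobs
instance (jobs : List (List (String × String))) (out : List (String × List (List (String × String)))) : Decidable (Spec_group_jobs_by_source jobs out) := by unfold Spec_group_jobs_by_source; infer_instance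

-- ===== CLAIM (what is proved, stated in full; the proofs are below) =====
def Claim_equal_group_jobs_by_source : Prop := ∀ (jobs : List (List (String × String))), Dom_group_jobs_by_source jobs → Spec_group_jobs_by_source jobs (group_jobs_by_source jobs)

-- ===== LEMMAS AND PROOFS =====

-- ---- A's grouping loop ----
lemma stepA_getD (d : PySem.Dict String (List (List (String × String)))) (j : List (String × String))
    (c : String) :
    (pvStepA d j).getD c [] = if pvSrc j = c then d.getD c [] ++ [j] else d.getD c [] := by
  unfold pvStepA
  by_cases hc : d.contains (pvSrc j) = false
  · simp only [hc, if_true, PySem.Dict.getD_insert]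
    by_cases h : pvSrc j = c
    · subst h
      simp [PySem.Dict.getD_of_not_contains d _ hc]
    · simp [h, Ne.symm h]
  · simp only [hc, PySem.Dict.getD_insert]
    by_cases h : pvSrc j = c
    · subst h; simp
    · simp [h, Ne.symm h]

lemma stepA_keys (d : PySem.Dict String (List (List (String × String)))) (j : List (String × String)) :
    (pvStepA d j).keys = PySem.Set.add d.keys (pvSrc j) := by
  unfold PySem.Set.add
  by_cases hc : d.contains (pvSrc j) = true
  · have hmem : pvSrc j ∈ d.keys := (PySem.Dict.contains_iff_mem_keys d _).mp hc
    simp [pvStepA, hc, PySem.Dict.keys_insert_of_contains _ _ hc,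
      hmem]
  · have hc' : d.contains (pvSrc j) = false := by revert hc; cases d.contains (pvSrc j) <;> simp
    have hnm : pvSrc j ∉ d.keys := fun hm => by
      simp [(PySem.Dict.contains_iff_mem_keys d _).mpr hm] at hc'
    have hset : PySem.Set.contains d.keys (pvSrc j) = false := by
      cases hb : PySem.Set.contains d.keys (pvSrc j)
      · rfl
      · exact absurd ((PySem.Set.contains_iff _ _).mp hb) hnm
    have h1 : (d.insert (pvSrc j) ([] : List (List (String × String)))).contains (pvSrc j) = true :=
      PySem.Dict.contains_insert_self d _ _
    simp [pvStepA, hc', PySem.Dict.keys_insert_of_contains _ _ h1,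
      PySem.Dict.keys_insert_of_not_contains d _ hc', hnm]

lemma foldA_getD (jobs : List (List (String × String)))
    (d : PySem.Dict String (List (List (String × String)))) (c : String) :
    (jobs.foldl pvStepA d).getD c [] = d.getD c [] ++ jobs.filter (fun j => pvSrc j == c) := by
  induction jobs generalizing d with
  | nil => simp
  | cons j t ih =>
    simp only [List.foldl_cons, ih, stepA_getD, List.filter_cons]
    by_cases h : pvSrc j = c <;> simp [h]

lemma foldA_keys (jobs : List (List (String × String)))
    (d : PySem.Dict String (List (List (String × String)))) :
    (jobs.foldl pvStepA d).keys = PySem.Set.update d.keys (jobs.map pvSrc) := by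
  induction jobs generalizing d with
  | nil => simp [PySem.Set.update]
  | cons j t ih =>
    simp only [List.foldl_cons, ih, stepA_keys, List.map_cons]
    rfl

-- ---- B's initial {src: []} comprehension ----
lemma foldBinit_getD (jobs : List (List (String × String)))
    (d : PySem.Dict String (List (List (String × String)))) (c : String)
    (h : d.getD c [] = []) :
    (jobs.foldl (fun d job => d.insert (pvSrc job) []) d).getD c [] = [] := by
  induction jobs generalizing d with
  | nil => simpa using h
  | cons j t ih =>
    simp only [List.foldl_cons]
    apply ih
    rw [PySem.Dict.getD_insert]
    split <;> simp [h]

-- ---- B's appending pass over the sorted list ----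
lemma foldBmod_getD (l : List (List (String × String)))
    (d : PySem.Dict String (List (List (String × String)))) (c : String) :
    (l.foldl (fun d job => d.modify (pvSrc job) [] (· ++ [job])) d).getD c []
      = d.getD c [] ++ l.filter (fun j => pvSrc j == c) := by
  induction l generalizing d with
  | nil => simp
  | cons j t ih =>
    simp only [List.foldl_cons, ih, PySem.Dict.getD_modify, List.filter_cons]
    by_cases h : pvSrc j = c
    · subst h; simp
    · simp [h, Ne.symm h]

-- ---- Set.update by already-present elements is the identity ----
lemma set_update_subset {s : PySem.Set String} {xs : List String}
    (h : ∀ x ∈ xs, x ∈ s) : PySem.Set.update s xs = s := by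
  induction xs generalizing s with
  | nil => rfl
  | cons x t ih =>
    have hx : x ∈ s := h x (by simp)
    show PySem.Set.update (PySem.Set.add s x) t = s
    have hadd : PySem.Set.add s x = s := by simp [PySem.Set.add, hx]
    rw [hadd]
    exact ih (fun y hy => h y (by simp [hy]))

-- ---- A's per-bucket sorting loop over the (nodup) key list ----
lemma foldSort_getD (L : List String) (d : PySem.Dict String (List (List (String × String))))
    (c : String) (hnd : L.Nodup) :
    (L.foldl (fun d s => d.insert s (PySem.List.sorted (d.getD s []) pvDate true)) d).getD c []
      = if c ∈ L then PySem.List.sorted (d.getD c []) pvDate true else d.getD c [] := by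
  induction L generalizing d with
  | nil => simp
  | cons s t ih =>
    have hnd' : t.Nodup := hnd.of_cons
    have hst : s ∉ t := by simp at hnd; exact hnd.1
    simp only [List.foldl_cons, ih _ hnd']
    by_cases hct : c ∈ t
    · have hcs : c ≠ s := fun h => hst (h ▸ hct)
      rw [PySem.Dict.getD_insert]
      simp [hct, hcs]
    · by_cases hcs : c = s
      · subst hcs
        rw [PySem.Dict.getD_insert]
        simp [hct]
      · rw [PySem.Dict.getD_insert]
        simp [hct, hcs]

-- ---- stability: filtering commutes with the stable reverse insertion sort ----
lemma insertBy_nil {α : Type} (before : α → α → Bool) (x : α) :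
    PySem.List.insertBy before x [] = [x] := rfl

lemma insertBy_cons {α : Type} (before : α → α → Bool) (x y : α) (t : List α) :
    PySem.List.insertBy before x (y :: t)
      = if before x y then x :: y :: t else y :: PySem.List.insertBy before x t := rfl

lemma insertBy_desc_pairwise (x : List (String × String)) (l : List (List (String × String)))
    (h : l.Pairwise (fun a b => pvDate b ≤ pvDate a)) :
    (PySem.List.insertBy (fun a b => decide (pvDate b < pvDate a)) x l).Pairwise
      (fun a b => pvDate b ≤ pvDate a) := by
  induction l with
  | nil => rw [insertBy_nil]; simp
  | cons y t ih =>
    rw [List.pairwise_cons] at h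
    rw [insertBy_cons]
    by_cases hb : pvDate y < pvDate x
    · rw [if_pos (by simpa using hb)]
      refine List.pairwise_cons.mpr ⟨?_, List.pairwise_cons.mpr h⟩
      intro z hz
      rcases List.mem_cons.mp hz with rfl | hz
      · exact le_of_lt hb
      · exact le_trans (h.1 z hz) (le_of_lt hb)
    · rw [if_neg (by simpa using hb)]
      refine List.pairwise_cons.mpr ⟨?_, ih h.2⟩
      intro z hz
      rcases (PySem.List.mem_insertBy _ x z t).mp hz with rfl | hz
      · exact le_of_not_gt hb
      · exact h.1 z hz

lemma filter_insertBy (p : List (String × String) → Bool) (x : List (String × String))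
    (l : List (List (String × String))) (h : l.Pairwise (fun a b => pvDate b ≤ pvDate a)) :
    (PySem.List.insertBy (fun a b => decide (pvDate b < pvDate a)) x l).filter p
      = if p x then PySem.List.insertBy (fun a b => decide (pvDate b < pvDate a)) x (l.filter p)
        else l.filter p := by
  induction l with
  | nil =>
    rw [insertBy_nil]
    by_cases hp : p x <;> simp [hp, insertBy_nil]
  | cons y t ih =>
    rw [List.pairwise_cons] at h
    rw [insertBy_cons]
    by_cases hb : pvDate y < pvDate x
    · rw [if_pos (by simpa using hb)]
      have hall : ∀ z ∈ (y :: t).filter p, pvDate z < pvDate x := by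
        intro z hz
        rcases List.mem_filter.mp hz with ⟨hz, _⟩
        rcases List.mem_cons.mp hz with rfl | hz
        · exact hb
        · exact lt_of_le_of_lt (h.1 z hz) hb
      by_cases hp : p x
      · rw [if_pos hp]
        cases hfl : (y :: t).filter p with
        | nil => rw [List.filter_cons_of_pos hp, hfl, insertBy_nil]
        | cons w u =>
          have hw : pvDate w < pvDate x := hall w (by simp [hfl])
          rw [List.filter_cons_of_pos hp, hfl, insertBy_cons, if_pos (by simpa using hw)]
      · rw [if_neg hp, List.filter_cons_of_neg hp]
    · rw [if_neg (by simpa using hb)]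
      by_cases hpy : p y
      · rw [List.filter_cons_of_pos hpy, ih h.2, List.filter_cons_of_pos hpy]
        by_cases hp : p x
        · rw [if_pos hp, if_pos hp, insertBy_cons, if_neg (by simpa using hb)]
        · simp [hp]
      · rw [List.filter_cons_of_neg hpy, ih h.2, List.filter_cons_of_neg hpy]

lemma filter_foldl_insertBy (p : List (String × String) → Bool)
    (xs acc : List (List (String × String)))
    (h : acc.Pairwise (fun a b => pvDate b ≤ pvDate a)) :
    (xs.foldl (fun acc x => PySem.List.insertBy (fun a b => decide (pvDate b < pvDate a)) x acc) acc).filter p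
      = (xs.filter p).foldl
          (fun acc x => PySem.List.insertBy (fun a b => decide (pvDate b < pvDate a)) x acc)
          (acc.filter p) := by
  induction xs generalizing acc with
  | nil => simp
  | cons x t ih =>
    simp only [List.foldl_cons, List.filter_cons]
    rw [ih _ (insertBy_desc_pairwise x acc h), filter_insertBy p x acc h]
    by_cases hp : p x <;> simp [hp]

lemma filter_sorted_rev (p : List (String × String) → Bool) (xs : List (List (String × String))) :
    (PySem.List.sorted xs pvDate true).filter p = PySem.List.sorted (xs.filter p) pvDate true := by
  rw [PySem.List.sorted_rev_eq_foldl_insertBy, PySem.List.sorted_rev_eq_foldl_insertBy]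
  simpa using filter_foldl_insertBy p xs [] (by simp)

-- ===== VERDICT (by name: the statement is the Claim_ definition above) =====
theorem group_jobs_by_source_spec : Claim_equal_group_jobs_by_source := by
  intro jobs _
  show group_jobs_by_source jobs = group_jobs_by_source_alt jobs
  unfold group_jobs_by_source group_jobs_by_source_alt
  set A1 := jobs.foldl pvStepA PySem.Dict.empty with hA1
  set B1 := jobs.foldl (fun d job => d.insert (pvSrc job) ([] : List (List (String × String)))) PySem.Dict.empty with hB1
  have hA1keys : A1.keys = PySem.Set.ofList (jobs.map pvSrc) := by
    rw [hA1, foldA_keys]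
    simp [PySem.Set.ofList_eq_foldl, PySem.Set.update, PySem.Dict.keys_empty]
  have hB1keys : B1.keys = PySem.Set.ofList (jobs.map pvSrc) := by
    rw [hB1, PySem.Dict.keys_foldl_insert_key]
    simp [PySem.Set.ofList_eq_foldl, PySem.Set.update, PySem.Dict.keys_empty]
  have hndA1 : A1.keys.Nodup := hA1keys ▸ PySem.Set.nodup_ofList _
  -- keys of the two result dicts
  have hA2keys : (A1.keys.foldl (fun d s => d.insert s (PySem.List.sorted (d.getD s []) pvDate true)) A1).keys = A1.keys := by
    rw [PySem.Dict.keys_foldl_insert_key A1.keys (fun s => s) _ A1]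
    simpa using set_update_subset (s := A1.keys) (xs := A1.keys) (fun x hx => hx)
  have hB2keys : ((PySem.List.sorted jobs pvDate true).foldl
      (fun d job => d.modify (pvSrc job) [] (· ++ [job])) B1).keys = B1.keys := by
    rw [PySem.Dict.keys_foldl_modify_key _ pvSrc ([] : List (List (String × String))) (fun d job v => v ++ [job]) B1]
    apply set_update_subset
    intro x hx
    rw [hB1keys, PySem.Set.mem_ofList]
    rcases List.mem_map.mp hx with ⟨j, hj, rfl⟩
    exact List.mem_map_of_mem ((PySem.List.sorted_perm jobs pvDate true).mem_iff.mp hj)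
  -- items via keys + getD
  rw [PySem.Dict.items_eq_map_keys _ (by rw [hA2keys]; exact hndA1) ([] : List (List (String × String))),
      PySem.Dict.items_eq_map_keys _ (by rw [hB2keys, hB1keys]; exact PySem.Set.nodup_ofList _) ([] : List (List (String × String)))]
  rw [hA2keys, hB2keys, hA1keys, hB1keys]
  apply List.map_congr_left
  intro c hc
  congr 1
  -- the c-bucket of each side
  rw [foldSort_getD _ _ _ (PySem.Set.nodup_ofList _), if_pos hc]
  rw [hA1, foldA_getD, PySem.Dict.getD_empty, List.nil_append]
  rw [foldBmod_getD, foldBinit_getD jobs _ c (PySem.Dict.getD_empty ..), List.nil_append]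
  exact (filter_sorted_rev (fun j => pvSrc j == c) jobs).symm
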